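-- pv_equiv track=rewrite | github.com/pypi-data/pypi-mirror-396 | packages/polar-python/polar_python-0.0.5-py3-none-any.whl/polar_python/parsers/compression.py | parse_delta_frame
-- ===== SOURCE A (Python) =====
-- from typing import List
--
-- def parse_delta_frame(
--     data: List[int], channels: int, bit_width: int
-- ) -> List[List[int]]:
--     """Parse delta frame data into samples."""
--     if len(data) == 0 or bit_width <= 0 or channels <= 0:
--         return []
--
--     bit_set = []
--     for byte_val in data:
--         for i in range(8):
--             bit_set.append((byte_val >> i) & 1)
--
--     samples = []
--     offset = 0
--
--     while offset + bit_width * channels <= len(bit_set):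
--         channel_samples = []
--         for _ in range(channels):
--             if offset + bit_width > len(bit_set):
--                 break
--
--             value = 0
--             for i in range(bit_width):
--                 if offset + i < len(bit_set):
--                     value |= bit_set[offset + i] << i
--
--             if bit_width > 1 and (value & (1 << (bit_width - 1))):
--                 value |= -1 << bit_width
--
--             channel_samples.append(value)
--             offset += bit_width
--
--         if len(channel_samples) == channels:
--             samples.append(channel_samples)
--
--     return samples
-- ===== SOURCE B (Python) =====
-- from typing import List
--
--
-- def parse_delta_frame(
--     data: List[int], channels: int, bit_width: int
-- ) -> List[List[int]]:
--     """Parse delta frame data into samples (shift-and-mask over a byte window)."""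
--     if bit_width <= 0 or channels <= 0:
--         return []
--
--     frame_bits = bit_width * channels
--     n_frames = (8 * len(data)) // frame_bits
--     mask = (1 << bit_width) - 1
--     sign_bit = (1 << (bit_width - 1)) if bit_width > 1 else 0
--
--     def extract(off: int) -> int:
--         lo = off >> 3
--         hi = (off + bit_width + 7) >> 3
--         chunk = 0
--         for j in range(lo, hi):
--             chunk += (data[j] & 0xFF) << (8 * (j - lo))
--         v = (chunk >> (off - 8 * lo)) & mask
--         return v - (mask + 1) if v & sign_bit else v
--
--     return [[extract((f * channels + c) * bit_width) for c in range(channels)]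
--             for f in range(n_frames)]
-- ===== Notes on version B (the rewrite author's own statement) =====
-- stated objective: faster
-- what changed: Replaces the materialized per-bit list and the per-sample bit-by-bit OR loop with a closed-form frame count and direct shift-and-mask extraction of each sample from its small byte window.
import Mathlib
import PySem

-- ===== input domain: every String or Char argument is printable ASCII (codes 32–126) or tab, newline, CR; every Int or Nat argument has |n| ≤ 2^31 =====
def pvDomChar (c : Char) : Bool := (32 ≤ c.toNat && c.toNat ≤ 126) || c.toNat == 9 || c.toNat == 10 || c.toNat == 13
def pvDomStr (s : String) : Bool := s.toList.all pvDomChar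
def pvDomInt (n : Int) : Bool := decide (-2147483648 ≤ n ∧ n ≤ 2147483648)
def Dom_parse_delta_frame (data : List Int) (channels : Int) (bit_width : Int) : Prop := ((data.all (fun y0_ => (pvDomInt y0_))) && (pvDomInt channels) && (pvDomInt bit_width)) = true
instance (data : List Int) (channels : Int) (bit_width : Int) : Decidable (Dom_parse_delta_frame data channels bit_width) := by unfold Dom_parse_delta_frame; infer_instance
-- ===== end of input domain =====

-- B replaces A's materialized per-bit list and per-sample bit-by-bit OR loop with a closed-form
-- frame count and shift-and-mask extraction of each sample from its byte window (faster by a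
-- constant factor: a few int operations per sample instead of Python-level work per bit).

-- ===== PORT A =====
-- bit_set construction: for byte_val in data: for i in range(8): bit_set.append((byte_val >> i) & 1)
def pdfByteBits (b : Int) (bs : List Int) : List Int :=
  (PySem.List.pyRange 0 8 1).foldl (fun bs2 i => bs2 ++ [PySem.Int.band (b >>> i.toNat) 1]) bs

def pdfBits (data : List Int) : List Int :=
  data.foldl (fun bs b => pdfByteBits b bs) []

-- one sample: the bit-accumulation loop and the sign-extension step
-- (the index offset+i is guarded in range by the loop's own test, so pyGetD's default is never read)
def pdfValStep (bit_set : List Int) (offset : Int) (v : Int) (i : Int) : Int :=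
  if offset + i < (bit_set.length : Int) then
    PySem.Int.bor v ((PySem.List.pyGetD bit_set (offset + i) 0) <<< i.toNat)
  else v

def pdfValue (bit_set : List Int) (bit_width : Int) (offset : Int) : Int :=
  let value := (PySem.List.pyRange 0 bit_width 1).foldl (pdfValStep bit_set offset) 0
  if bit_width > 1 ∧ PySem.Int.band value (1 <<< (bit_width - 1).toNat) ≠ 0 then
    PySem.Int.bor value ((-1 : Int) <<< bit_width.toNat)
  else value

-- 'for _ in range(channels)' with its break
def pdfInner (bit_set : List Int) (bit_width : Int) : Nat → Int → List Int → List Int × Int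
  | 0, offset, cs => (cs, offset)
  | k+1, offset, cs =>
    if (bit_set.length : Int) < offset + bit_width then (cs, offset)
    else pdfInner bit_set bit_width k (offset + bit_width) (cs ++ [pdfValue bit_set bit_width offset])

-- the while loop; fuel bit_set.length + 1 bounds its iteration count (offset grows each round)
def pdfOuter (bit_set : List Int) (channels : Int) (bit_width : Int) :
    Nat → Int → List (List Int) → List (List Int)
  | 0, _, samples => samples
  | fuel+1, offset, samples =>
    if offset + bit_width * channels ≤ (bit_set.length : Int) then
      let r := pdfInner bit_set bit_width channels.toNat offset []
      pdfOuter bit_set channels bit_width fuel r.2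
        (if (r.1.length : Int) = channels then samples ++ [r.1] else samples)
    else samples

def parse_delta_frame (data : List Int) (channels : Int) (bit_width : Int) : List (List Int) :=
  if data.length = 0 ∨ bit_width ≤ 0 ∨ channels ≤ 0 then []
  else
    let bit_set := pdfBits data
    pdfOuter bit_set channels bit_width (bit_set.length + 1) 0 []

-- ===== PORT B =====
-- chunk accumulation: for j in range(lo, hi): chunk += (data[j] & 0xFF) << (8 * (j - lo))
-- (j is guarded in range by the caller's frame bound, so pyGetD's default is never read)
def pdfAltChunk (data : List Int) (lo : Int) (hi : Int) : Int :=
  (PySem.List.pyRange lo hi 1).foldl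
    (fun chunk j => chunk + (PySem.Int.band (PySem.List.pyGetD data j 0) 255) <<< (8 * (j - lo)).toNat) 0

-- extract(off): shift-and-mask the byte window [off >> 3, (off + bit_width + 7) >> 3)
def pdfAltExtract (data : List Int) (bit_width : Int) (mask : Int) (sign_bit : Int) (off : Int) : Int :=
  let lo := off >>> (3 : Nat)
  let hi := (off + bit_width + 7) >>> (3 : Nat)
  let chunk := pdfAltChunk data lo hi
  let v := PySem.Int.band (chunk >>> (off - 8 * lo).toNat) mask
  if PySem.Int.band v sign_bit ≠ 0 then v - (mask + 1) else v

def parse_delta_frame_alt (data : List Int) (channels : Int) (bit_width : Int) : List (List Int) :=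
  if bit_width ≤ 0 ∨ channels ≤ 0 then []
  else
    let frame_bits := bit_width * channels
    let n_frames := PySem.Int.floordiv (8 * (data.length : Int)) frame_bits
    let mask := (1 : Int) <<< bit_width.toNat - 1
    let sign_bit := if bit_width > 1 then (1 : Int) <<< (bit_width - 1).toNat else 0
    (PySem.List.pyRange 0 n_frames 1).map fun f =>
      (PySem.List.pyRange 0 channels 1).map fun c =>
        pdfAltExtract data bit_width mask sign_bit ((f * channels + c) * bit_width)

-- ===== PRECONDITION & SPEC =====
def Spec_parse_delta_frame (data : List Int) (channels : Int) (bit_width : Int) (out : List (List Int)) : Prop := out = parse_delta_frame_alt data channels bit_width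
instance (data : List Int) (channels : Int) (bit_width : Int) (out : List (List Int)) : Decidable (Spec_parse_delta_frame data channels bit_width out) := by unfold Spec_parse_delta_frame; infer_instance

-- ===== CLAIM (what is proved, stated in full; the proofs are below) =====
def Claim_equal_parse_delta_frame : Prop := ∀ (data : List Int) (channels : Int) (bit_width : Int), Dom_parse_delta_frame data channels bit_width → Spec_parse_delta_frame data channels bit_width (parse_delta_frame data channels bit_width)

-- ===== LEMMAS AND PROOFS =====

-- proof-side normal form: N = the data as one big natural, samples read by shift-and-mod
def pdfLowByte (b : Int) : Nat := (b % 256).toNat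

def pdfNatBig : List Int → Nat
  | [] => 0
  | b :: rest => pdfLowByte b + 256 * pdfNatBig rest

def pdfBitI (N : Nat) (k : Nat) : Int := if N.testBit k then 1 else 0

def pdfValN (N : Nat) (w : Nat) (off : Nat) : Nat := (N >>> off) % 2 ^ w

def pdfValI (N : Nat) (w : Nat) (off : Nat) : Int :=
  if N.testBit (off + (w - 1)) ∧ 1 < w then (pdfValN N w off : Int) - 2 ^ w else (pdfValN N w off : Int)

def pdfFrame (N : Nat) (w : Nat) (c : Nat) (f : Nat) : List Int :=
  (List.range c).map fun k => pdfValI N w ((f * c + k) * w)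

-- small bit-arithmetic facts
lemma pdf_lor_two_pow {u i : Nat} (h : u < 2 ^ i) : u ||| 2 ^ i = u + 2 ^ i := by
  apply Nat.eq_of_testBit_eq
  intro j
  rw [Nat.testBit_lor, Nat.add_comm]
  rcases lt_trichotomy j i with hj | hj | hj
  · rw [Nat.testBit_two_pow_add_gt hj, Nat.testBit_two_pow]
    simp [Nat.ne_of_gt hj]
  · subst hj
    rw [Nat.testBit_two_pow_add_eq, Nat.testBit_eq_false_of_lt h, Nat.testBit_two_pow]
    simp
  · have h1 : u.testBit j = false := Nat.testBit_eq_false_of_lt (lt_trans h (Nat.pow_lt_pow_right one_lt_two hj))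
    have h2 : (2 ^ i).testBit j = false := by rw [Nat.testBit_two_pow]; simp [Nat.ne_of_lt hj]
    have h3 : (2 ^ i + u).testBit j = false := by
      apply Nat.testBit_eq_false_of_lt
      calc 2 ^ i + u < 2 ^ i + 2 ^ i := by omega
        _ = 2 ^ (i + 1) := by ring
        _ ≤ 2 ^ j := Nat.pow_le_pow_right (by norm_num) hj
    simp [h1, h2, h3]

lemma pdf_band_255 (b : Int) : PySem.Int.band b 255 = (pdfLowByte b : Int) := by
  unfold pdfLowByte
  cases b with
  | ofNat n =>
    simp only [PySem.Int.band, Int.ofNat_eq_natCast]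
    rw [if_pos (by positivity), if_pos (by norm_num)]
    have h255 : (255 : Int).toNat = 2 ^ 8 - 1 := rfl
    rw [Int.toNat_natCast, h255, Nat.and_two_pow_sub_one_eq_mod]
    omega
  | negSucc n =>
    simp only [PySem.Int.band]
    rw [if_neg (by omega), if_pos (by norm_num)]
    have hn : ((-(Int.negSucc n) - 1).toNat) = n := by
      rw [Int.negSucc_eq]; omega
    have h255 : (255 : Int).toNat = 2 ^ 8 - 1 := rfl
    rw [hn, h255, Nat.and_comm, Nat.and_two_pow_sub_one_eq_mod]
    have hns : Int.negSucc n = -(n : Int) - 1 := by rw [Int.negSucc_eq]; ring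
    rw [hns]
    have h2 : n % 2 ^ 8 = n % 256 := rfl
    rw [h2]
    omega

lemma pdf_one_shiftLeft (s : Nat) : ((1 : Int) <<< s) = ((2 ^ s : Nat) : Int) := by
  show (Int.ofNat (1 <<< s)) = _
  rw [Nat.one_shiftLeft]; rfl

lemma pdf_neg_one_shiftLeft (s : Nat) : ((-1 : Int) <<< s) = -((2 : Int) ^ s) := by
  show Int.shiftLeft (-1) s = _
  have hneg : (-1 : Int) = Int.negSucc 0 := rfl
  rw [hneg]
  show Int.negSucc ((0 + 1) <<< s - 1) = _
  rw [Int.negSucc_eq]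
  have hs : (0 + 1) <<< s = 2 ^ s := by rw [Nat.zero_add, Nat.one_shiftLeft]
  rw [hs]
  have h1 : (1:Nat) ≤ 2 ^ s := Nat.one_le_two_pow
  push_cast [h1]
  ring


lemma pdf_bor_neg_two_pow {u w : Nat} (h : u < 2 ^ w) :
    PySem.Int.bor (u : Int) (-((2 : Int) ^ w)) = (u : Int) - 2 ^ w := by
  simp only [PySem.Int.bor]
  have hc : ((2:Int) ^ w) = ((2 ^ w : Nat) : Int) := by push_cast; ring
  have hp : (0:Int) < 2 ^ w := by positivity
  rw [if_pos (by positivity), if_neg (by omega)]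
  have h1 : ((-(-((2:Int) ^ w)) - 1).toNat) = 2 ^ w - 1 := by omega
  rw [h1, Int.toNat_natCast, Nat.and_comm, Nat.and_two_pow_sub_one_eq_mod, Nat.mod_eq_of_lt h]
  omega

lemma pdf_band_sign_ne {u i : Nat} :
    (PySem.Int.band (u : Int) ((2 ^ i : Nat) : Int) ≠ 0) ↔ u.testBit i = true := by
  rw [PySem.Int.band_natCast, Nat.and_two_pow]
  cases hb : u.testBit i <;> simp

lemma pdf_byte_bit (b : Int) (i : Nat) (hi : i < 8) :
    PySem.Int.band (b >>> i) 1 = pdfBitI (pdfLowByte b) i := by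
  unfold pdfBitI pdfLowByte
  rw [PySem.Int.band_one, PySem.Int.mod_eq_emod_of_pos (by norm_num), Int.shiftRight_eq_div_pow]
  have hpow : ((2 ^ i : Nat) : Int) = (2:Int) ^ i := by push_cast; ring
  set r : Nat := (b % 256).toNat with hr
  set q : Int := b / 256 with hq
  have hb256 : b = (r : Int) + ((2 ^ i : Nat) : Int) * (2 ^ (8 - i) * q) := by
    have h1 : 256 * q + b % 256 = b := Int.mul_ediv_add_emod b 256
    have h2 : ((r : Int)) = b % 256 := by
      have : (0:Int) ≤ b % 256 := Int.emod_nonneg b (by norm_num)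
      omega
    have h3 : ((2 ^ i : Nat) : Int) * 2 ^ (8 - i) = 256 := by
      rw [hpow, ← pow_add, show i + (8 - i) = 8 by omega]
      norm_num
    calc b = 256 * q + b % 256 := h1.symm
      _ = (r : Int) + (((2 ^ i : Nat) : Int) * 2 ^ (8 - i)) * q := by rw [h2, h3]; ring
      _ = (r : Int) + ((2 ^ i : Nat) : Int) * (2 ^ (8 - i) * q) := by ring
  have hdiv : b / ((2 ^ i : Nat) : Int) = (r : Int) / ((2 ^ i : Nat) : Int) + 2 ^ (8 - i) * q := by
    conv_lhs => rw [hb256]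
    rw [Int.add_mul_ediv_left _ _ (by positivity : (((2 ^ i : Nat) : Int)) ≠ 0)]
  rw [hdiv]
  have h8 : (2:Int) ^ (8 - i) = 2 * 2 ^ (7 - i) := by
    rw [← pow_succ']
    congr 1
    omega
  have hmod : ((r : Int) / ((2 ^ i : Nat) : Int) + 2 ^ (8 - i) * q) % 2
      = (r : Int) / ((2 ^ i : Nat) : Int) % 2 := by
    rw [h8, mul_assoc, Int.add_mul_emod_self_left]
  rw [hmod, ← Int.natCast_div, show ((2:Int)) = ((2:Nat):Int) from rfl, ← Int.natCast_mod,
    Nat.testBit_eq_decide_div_mod_eq]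
  have h2 : r / 2 ^ i % 2 = 0 ∨ r / 2 ^ i % 2 = 1 := by omega
  rcases h2 with h | h <;> rw [h] <;> simp

lemma pdf_chunk (b : Int) (bs : List Int) :
    pdfByteBits b bs = bs ++ (List.range 8).map (pdfBitI (pdfLowByte b)) := by
  unfold pdfByteBits
  rw [show PySem.List.pyRange 0 8 1 = [0,1,2,3,4,5,6,7] by decide,
    show List.range 8 = [0,1,2,3,4,5,6,7] by decide]
  simp only [List.foldl_cons, List.foldl_nil, List.map_cons, List.map_nil, List.append_assoc,
    Int.shiftRight_natCast_right]
  norm_num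
  exact ⟨by simpa using pdf_byte_bit b 0 (by norm_num), pdf_byte_bit b 1 (by norm_num), pdf_byte_bit b 2 (by norm_num),
    pdf_byte_bit b 3 (by norm_num), pdf_byte_bit b 4 (by norm_num), pdf_byte_bit b 5 (by norm_num),
    pdf_byte_bit b 6 (by norm_num), pdf_byte_bit b 7 (by norm_num)⟩

lemma pdf_bits_aux : ∀ (data : List Int) (bs : List Int),
    data.foldl (fun bs b => pdfByteBits b bs) bs = bs ++ (List.range (8 * data.length)).map (pdfBitI (pdfNatBig data)) := by
  intro data
  induction data with
  | nil => intro bs; simp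
  | cons b rest ih =>
    intro bs
    rw [List.foldl_cons, pdf_chunk, ih]
    have hr : pdfLowByte b < 256 := by unfold pdfLowByte; omega
    have hsplit : (List.range (8 * (b :: rest).length)).map (pdfBitI (pdfNatBig (b :: rest)))
        = (List.range 8).map (pdfBitI (pdfLowByte b))
          ++ (List.range (8 * rest.length)).map (pdfBitI (pdfNatBig rest)) := by
      rw [show 8 * (b :: rest).length = 8 + 8 * rest.length by simp; ring, List.range_add,
        List.map_append, List.map_map]
      congr 1
      · apply List.map_congr_left
        intro k hk
        have hk8 : k < 8 := List.mem_range.mp hk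
        have hmod : pdfNatBig (b :: rest) % 2 ^ 8 = pdfLowByte b := by
          simp only [pdfNatBig]
          omega
        have ht : (pdfLowByte b).testBit k = (pdfNatBig (b :: rest)).testBit k := by
          rw [← hmod, Nat.testBit_mod_two_pow]
          simp [hk8]
        simp [pdfBitI, ht]
      · apply List.map_congr_left
        intro k hk
        simp only [Function.comp_apply]
        have hsh : pdfNatBig (b :: rest) >>> 8 = pdfNatBig rest := by
          rw [Nat.shiftRight_eq_div_pow]
          simp only [pdfNatBig]
          omega
        have ht : (pdfNatBig rest).testBit k = (pdfNatBig (b :: rest)).testBit (8 + k) := by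
          rw [← hsh, Nat.testBit_shiftRight]
        simp [pdfBitI, ht]
    rw [hsplit, List.append_assoc]

lemma pdf_bits_eq (data : List Int) :
    pdfBits data = (List.range (8 * data.length)).map (pdfBitI (pdfNatBig data)) := by
  unfold pdfBits
  rw [pdf_bits_aux]
  simp

lemma pdf_natBig_lt (data : List Int) : pdfNatBig data < 2 ^ (8 * data.length) := by
  induction data with
  | nil => simp [pdfNatBig]
  | cons b rest ih =>
    have hr : pdfLowByte b < 256 := by unfold pdfLowByte; omega
    have h1 : pdfNatBig (b :: rest) < 256 * (pdfNatBig rest + 1) := by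
      simp only [pdfNatBig]; omega
    have h2 : 256 * (pdfNatBig rest + 1) ≤ 256 * 2 ^ (8 * rest.length) :=
      Nat.mul_le_mul_left _ (by omega)
    have h3 : (256 : Nat) * 2 ^ (8 * rest.length) = 2 ^ (8 * (rest.length + 1)) := by
      rw [show 8 * (rest.length + 1) = 8 * rest.length + 8 by ring, pow_add]
      ring
    simp only [List.length_cons]
    omega

lemma pdf_value_fold {N n : Nat} (hN : N < 2 ^ n) (w off : Nat) :
    (PySem.List.pyRange 0 (w : Int) 1).foldl
      (pdfValStep ((List.range n).map (pdfBitI N)) (off : Int)) 0 = (pdfValN N w off : Int) := by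
  induction w with
  | zero => simp [PySem.List.pyRange_one_eq_nil, pdfValN]
  | succ w ih =>
    rw [show ((w + 1 : Nat) : Int) = (w : Int) + 1 by push_cast; ring,
      PySem.List.pyRange_one_succ_right (by positivity), List.foldl_append, ih]
    simp only [List.foldl_cons, List.foldl_nil]
    unfold pdfValStep
    have hlen : (((List.range n).map (pdfBitI N)).length) = n := by simp
    have hbit : (N >>> off).testBit w = N.testBit (off + w) := by
      rw [Nat.testBit_shiftRight]
    have hd : N.testBit (off + w) = decide ((N >>> off) / 2 ^ w % 2 = 1) := by
      rw [← hbit, Nat.testBit_eq_decide_div_mod_eq]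
    have hmod : pdfValN N (w + 1) off
        = pdfValN N w off + (if N.testBit (off + w) then 2 ^ w else 0) := by
      unfold pdfValN
      rw [Nat.mod_pow_succ]
      rcases hb : N.testBit (off + w) with _ | _ <;> rw [hb] at hd
      · have h0 : (N >>> off) / 2 ^ w % 2 = 0 := by
          have h := hd.symm
          simp only [decide_eq_false_iff_not] at h
          omega
        rw [h0]
        simp
      · have h1 : (N >>> off) / 2 ^ w % 2 = 1 := by
          have h := hd.symm
          simpa using h
        rw [h1]
        simp
    by_cases hin : off + w < n
    · rw [if_pos (by rw [hlen]; push_cast; omega)]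
      have hget : PySem.List.pyGetD ((List.range n).map (pdfBitI N)) ((off : Int) + (w : Int)) 0
          = pdfBitI N (off + w) := by
        rw [show ((off : Int) + (w : Int)) = ((off + w : Nat) : Int) by push_cast; ring,
          PySem.List.pyGetD_natCast]
        simp [List.getD, hin, pdfBitI]
      rw [hget]
      unfold pdfBitI
      rcases hb : N.testBit (off + w) with _ | _
      · rw [if_neg (by simp)]
        rw [show ((0:Int) <<< ((w:Int)).toNat) = 0 by simp [Int.shiftLeft_natCast_right]]
        rw [PySem.Int.bor_zero]
        rw [hmod, hb]
        simp
      · rw [if_pos rfl]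
        have htn : ((w : Int)).toNat = w := by omega
        rw [htn, pdf_one_shiftLeft, PySem.Int.bor_natCast]
        rw [pdf_lor_two_pow (by unfold pdfValN; exact Nat.mod_lt _ (by positivity))]
        rw [hmod, hb]
        simp
    · rw [if_neg (by rw [hlen]; push_cast; omega)]
      have hb : N.testBit (off + w) = false := by
        apply Nat.testBit_eq_false_of_lt
        calc N < 2 ^ n := hN
          _ ≤ 2 ^ (off + w) := Nat.pow_le_pow_right (by norm_num) (by omega)
      rw [hmod, hb]
      simp

lemma pdf_testBit_valN {N w off : Nat} (hw : 0 < w) :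
    (pdfValN N w off).testBit (w - 1) = N.testBit (off + (w - 1)) := by
  unfold pdfValN
  rw [Nat.testBit_mod_two_pow, Nat.testBit_shiftRight]
  simp [show w - 1 < w by omega]

lemma pdf_value_eq {N n : Nat} (hN : N < 2 ^ n) {w : Nat} (hw : 0 < w) (off : Nat) :
    pdfValue ((List.range n).map (pdfBitI N)) (w : Int) (off : Int) = pdfValI N w off := by
  unfold pdfValue pdfValI
  rw [pdf_value_fold hN]
  have hvlt : pdfValN N w off < 2 ^ w := Nat.mod_lt _ (by positivity)
  have htn1 : (((w : Int)) - 1).toNat = w - 1 := by omega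
  have htn : ((w : Int)).toNat = w := by omega
  by_cases h1 : 1 < w
  · rw [htn1, Nat.one_shiftLeft]
    by_cases hb : (pdfValN N w off).testBit (w - 1) = true
    · rw [if_pos ⟨by exact_mod_cast h1, pdf_band_sign_ne.mpr hb⟩,
        if_pos ⟨by rw [← pdf_testBit_valN hw]; exact hb, h1⟩]
      rw [htn, pdf_neg_one_shiftLeft, pdf_bor_neg_two_pow hvlt]
    · rw [if_neg (by
        rintro ⟨-, hne⟩
        exact hb (pdf_band_sign_ne.mp hne)),
        if_neg (by
        rintro ⟨hbb, -⟩
        rw [← pdf_testBit_valN hw] at hbb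
        exact hb hbb)]
  · have hw1 : w = 1 := by omega
    rw [if_neg (by
      rintro ⟨hgt, -⟩
      rw [hw1] at hgt
      norm_num at hgt),
      if_neg (by
      rintro ⟨-, hgt⟩
      omega)]

lemma pdf_inner_eq {N n : Nat} (hN : N < 2 ^ n) {w : Nat} (hw : 0 < w) :
    ∀ (k off : Nat) (cs : List Int), off + w * k ≤ n →
      pdfInner ((List.range n).map (pdfBitI N)) (w : Int) k (off : Int) cs =
        (cs ++ (List.range k).map (fun j => pdfValI N w (off + j * w)), ((off + k * w : Nat) : Int)) := by
  intro k
  induction k with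
  | zero => intro off cs h; simp [pdfInner]
  | succ k ih =>
    intro off cs h
    rw [pdfInner]
    rw [if_neg (by
      simp only [List.length_map, List.length_range]
      push_cast
      have : off + w ≤ n := by
        have : w * (k + 1) = w * k + w := by ring
        omega
      omega)]
    rw [show ((off : Int) + (w : Int)) = ((off + w : Nat) : Int) by push_cast; ring]
    rw [pdf_value_eq hN hw, ih (off + w) _ (by
      have : w * (k + 1) = w * k + w := by ring
      omega)]
    rw [Prod.mk.injEq]
    refine ⟨?_, by push_cast; ring⟩
    rw [List.range_succ_eq_map, List.map_cons, List.map_map, List.append_assoc, List.singleton_append]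
    congr 2
    · congr 1
      simp
    · apply List.map_congr_left
      intro j hj
      simp only [Function.comp_apply]
      congr 1
      rw [Nat.succ_mul]
      ring

lemma pdf_outer_eq {N n : Nat} (hN : N < 2 ^ n) {w c : Nat} (hw : 0 < w) (hc : 0 < c) :
    ∀ (fuel f : Nat) (samples : List (List Int)), n / (w * c) ≤ f + fuel →
      pdfOuter ((List.range n).map (pdfBitI N)) (c : Int) (w : Int) fuel ((f * (w * c) : Nat) : Int) samples =
        samples ++ (List.range (n / (w * c) - f)).map (fun g => pdfFrame N w c (f + g)) := by
  intro fuel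
  induction fuel with
  | zero =>
    intro f samples hle
    rw [pdfOuter]
    rw [show n / (w * c) - f = 0 by omega]
    simp
  | succ fuel ih =>
    intro f samples hle
    rw [pdfOuter]
    have hwc : 0 < w * c := Nat.mul_pos hw hc
    by_cases hf : f < n / (w * c)
    · have hguard : ((f * (w * c) : Nat) : Int) + (w : Int) * (c : Int) ≤ ((((List.range n).map (pdfBitI N)).length : Nat) : Int) := by
        simp only [List.length_map, List.length_range]
        have : (f + 1) * (w * c) ≤ n := (Nat.le_div_iff_mul_le hwc).mp (by omega)
        push_cast
        nlinarith [this]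
      rw [if_pos hguard]
      have htc : ((c : Int)).toNat = c := by omega
      rw [htc]
      rw [pdf_inner_eq hN hw c (f * (w * c)) [] (by
        have : (f + 1) * (w * c) ≤ n := (Nat.le_div_iff_mul_le hwc).mp (by omega)
        nlinarith [this])]
      simp only [List.nil_append, List.length_map, List.length_range]
      rw [if_pos trivial]
      have hoff : f * (w * c) + c * w = (f + 1) * (w * c) := by ring
      rw [hoff, ih (f + 1) _ (by omega)]
      rw [List.append_assoc]
      congr 1
      rw [show n / (w * c) - f = (n / (w * c) - (f + 1)) + 1 by omega,
        List.range_succ_eq_map, List.map_cons, List.map_map, List.singleton_append]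
      congr 1
      · unfold pdfFrame
        apply List.map_congr_left
        intro j hj
        congr 2
        ring
      · apply List.map_congr_left
        intro g hg
        simp only [Function.comp_apply]
        congr 1
        omega
    · rw [if_neg (by
        simp only [List.length_map, List.length_range]
        intro hcon
        apply hf
        have h1 : (f + 1) * (w * c) ≤ n := by
          push_cast at hcon
          nlinarith [hcon]
        have h2 := (Nat.le_div_iff_mul_le hwc).mpr h1
        omega)]
      rw [show n / (w * c) - f = 0 by omega]
      simp

lemma pdf_natBig_append_singleton (xs : List Int) (b : Int) :
    pdfNatBig (xs ++ [b]) = pdfNatBig xs + pdfLowByte b * 2 ^ (8 * xs.length) := by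
  induction xs with
  | nil => simp [pdfNatBig]
  | cons a xs ih =>
    simp only [List.cons_append, pdfNatBig, ih, List.length_cons]
    rw [show 8 * (xs.length + 1) = 8 * xs.length + 8 by ring, pow_add]
    ring

lemma pdf_natBig_drop (data : List Int) : ∀ lo : Nat,
    pdfNatBig (data.drop lo) = pdfNatBig data / 2 ^ (8 * lo) := by
  induction data with
  | nil => intro lo; simp [pdfNatBig]
  | cons b rest ih =>
    intro lo
    cases lo with
    | zero => simp
    | succ lo =>
      rw [List.drop_succ_cons, ih lo]
      have hr : pdfLowByte b < 256 := by unfold pdfLowByte; omega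
      have h1 : pdfNatBig (b :: rest) / 256 = pdfNatBig rest := by
        simp only [pdfNatBig]
        omega
      rw [show 8 * (lo + 1) = 8 + 8 * lo by ring, pow_add,
        ← Nat.div_div_eq_div_mul, show (2:Nat) ^ 8 = 256 by norm_num, h1]

lemma pdf_natBig_take (data : List Int) : ∀ t : Nat,
    pdfNatBig (data.take t) = pdfNatBig data % 2 ^ (8 * t) := by
  induction data with
  | nil => intro t; simp [pdfNatBig]
  | cons b rest ih =>
    intro t
    cases t with
    | zero => simp [pdfNatBig, Nat.mod_one]
    | succ t =>
      rw [List.take_succ_cons]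
      simp only [pdfNatBig, ih t]
      have hr : pdfLowByte b < 256 := by unfold pdfLowByte; omega
      have hK : (0:Nat) < 2 ^ (8 * t) := by positivity
      set K : Nat := 2 ^ (8 * t) with hKdef
      have hsplit : 8 * (t + 1) = 8 + 8 * t := by ring
      rw [hsplit, pow_add, show (2:Nat) ^ 8 = 256 by norm_num]
      -- goal: pdfLowByte b + 256 * (pdfNatBig rest % K) = (pdfLowByte b + 256 * pdfNatBig rest) % (256 * K)
      have hdecomp : pdfLowByte b + 256 * pdfNatBig rest
          = (pdfLowByte b + 256 * (pdfNatBig rest % K)) + (256 * K) * (pdfNatBig rest / K) := by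
        have := Nat.div_add_mod (pdfNatBig rest) K
        calc pdfLowByte b + 256 * pdfNatBig rest
            = pdfLowByte b + 256 * (K * (pdfNatBig rest / K) + pdfNatBig rest % K) := by rw [this]
          _ = (pdfLowByte b + 256 * (pdfNatBig rest % K)) + (256 * K) * (pdfNatBig rest / K) := by ring
      rw [hdecomp, Nat.add_mul_mod_self_left]
      have hlt : pdfLowByte b + 256 * (pdfNatBig rest % K) < 256 * K := by
        have h2 : pdfNatBig rest % K < K := Nat.mod_lt _ hK
        have h3 : 256 * (pdfNatBig rest % K) ≤ 256 * (K - 1) := by omega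
        have h4 : 256 * (K - 1) = 256 * K - 256 := by omega
        omega
      rw [Nat.mod_eq_of_lt hlt]

lemma pdf_chunk_aux (data : List Int) : ∀ (t lo : Nat), lo + t ≤ data.length →
    pdfAltChunk data (lo : Int) ((lo + t : Nat) : Int) = (pdfNatBig ((data.drop lo).take t) : Int) := by
  intro t
  induction t with
  | zero =>
    intro lo h
    unfold pdfAltChunk
    rw [show ((lo + 0 : Nat) : Int) = (lo : Int) by push_cast; ring,
      PySem.List.pyRange_one_eq_nil (le_refl _)]
    simp [pdfNatBig]
  | succ t ih =>
    intro lo h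
    unfold pdfAltChunk
    rw [show ((lo + (t+1) : Nat) : Int) = ((lo + t : Nat) : Int) + 1 by push_cast; ring,
      PySem.List.pyRange_one_succ_right (by push_cast; omega), List.foldl_append]
    have ihh := ih lo (by omega)
    unfold pdfAltChunk at ihh
    rw [ihh]
    simp only [List.foldl_cons, List.foldl_nil]
    have hget : PySem.List.pyGetD data ((lo + t : Nat) : Int) 0 = data.getD (lo + t) 0 :=
      PySem.List.pyGetD_natCast data (lo + t) 0
    rw [hget, pdf_band_255]
    have htoNat : ((8 : Int) * (((lo + t : Nat) : Int) - (lo : Int))).toNat = 8 * t := by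
      push_cast
      omega
    rw [htoNat]
    have htake : (data.drop lo).take (t + 1)
        = (data.drop lo).take t ++ [data.getD (lo + t) 0] := by
      rw [List.take_succ]
      congr 1
      have hidx : (data.drop lo)[t]? = some (data.getD (lo + t) 0) := by
        rw [List.getElem?_drop]
        rw [List.getD_eq_getElem data 0 (by omega)]
        exact List.getElem?_eq_getElem (by omega)
      rw [hidx]
      rfl
    rw [htake, pdf_natBig_append_singleton]
    have hlen : ((data.drop lo).take t).length = t := by
      rw [List.length_take, List.length_drop]
      omega
    rw [hlen]
    rw [show ((pdfLowByte (data.getD (lo + t) 0) : Int) <<< (8 * t))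
        = ((pdfLowByte (data.getD (lo + t) 0) <<< (8 * t) : Nat) : Int) from rfl,
      Nat.shiftLeft_eq]
    push_cast
    ring

lemma pdf_chunk_val (N w off lo t : Nat) (hlo : 8 * lo ≤ off) (hhi : off + w ≤ 8 * lo + 8 * t) :
    (((N >>> (8 * lo)) % 2 ^ (8 * t)) >>> (off - 8 * lo)) % 2 ^ w = pdfValN N w off := by
  unfold pdfValN
  apply Nat.eq_of_testBit_eq
  intro i
  rw [Nat.testBit_mod_two_pow, Nat.testBit_mod_two_pow, Nat.testBit_shiftRight,
    Nat.testBit_shiftRight, Nat.testBit_mod_two_pow, Nat.testBit_shiftRight]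
  by_cases hi : i < w
  · simp only [hi, decide_true, Bool.true_and]
    rw [show 8 * lo + (off - 8 * lo + i) = off + i by omega]
    simp [show off - 8 * lo + i < 8 * t by omega]
  · simp [hi]

lemma pdf_alt_extract_eq (data : List Int) {w : Nat} (hw : 0 < w) (off : Nat)
    (hoff : off + w ≤ 8 * data.length) :
    pdfAltExtract data (w : Int) ((1 : Int) <<< w - 1)
      (if (w : Int) > 1 then (1 : Int) <<< ((w : Int) - 1).toNat else 0) (off : Int)
      = pdfValI (pdfNatBig data) w off := by
  unfold pdfAltExtract
  have hlo : ((off : Int) >>> (3 : Nat)) = ((off / 8 : Nat) : Int) := by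
    rw [show ((off : Int) >>> (3 : Nat)) = ((off >>> 3 : Nat) : Int) from rfl,
      Nat.shiftRight_eq_div_pow]
  have hhi : (((off : Int) + (w : Int) + 7) >>> (3 : Nat)) = (((off + w + 7) / 8 : Nat) : Int) := by
    rw [show ((off : Int) + (w : Int) + 7) = ((off + w + 7 : Nat) : Int) by push_cast; ring,
      show (((off + w + 7 : Nat) : Int) >>> (3 : Nat)) = (((off + w + 7) >>> 3 : Nat) : Int) from rfl,
      Nat.shiftRight_eq_div_pow]
  set L : Nat := off / 8 with hLdef
  set H : Nat := (off + w + 7) / 8 with hHdef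
  have hLH : L ≤ H := by omega
  have hHlen : H ≤ data.length := by omega
  have hchunk : pdfAltChunk data (L : Int) ((H : Nat) : Int)
      = ((((pdfNatBig data >>> (8 * L)) % 2 ^ (8 * (H - L))) : Nat) : Int) := by
    rw [show ((H : Nat) : Int) = ((L + (H - L) : Nat) : Int) by push_cast; omega,
      pdf_chunk_aux data (H - L) L (by omega),
      pdf_natBig_take, pdf_natBig_drop, Nat.shiftRight_eq_div_pow]
  simp only [hlo, hhi]
  rw [hchunk]
  have htn : (((off : Int)) - 8 * ((L : Nat) : Int)).toNat = off - 8 * L := by omega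
  rw [htn]
  have hmask : ((1 : Int) <<< w - 1) = ((2 ^ w - 1 : Nat) : Int) := by
    rw [pdf_one_shiftLeft]
    have h1 : (1:Nat) ≤ 2 ^ w := Nat.one_le_two_pow
    push_cast [h1]
    ring
  have hv : PySem.Int.band
      ((((pdfNatBig data >>> (8 * L)) % 2 ^ (8 * (H - L)) : Nat) : Int) >>> (off - 8 * L))
      ((1 : Int) <<< w - 1) = ((pdfValN (pdfNatBig data) w off : Nat) : Int) := by
    rw [hmask,
      show ((((pdfNatBig data >>> (8 * L)) % 2 ^ (8 * (H - L)) : Nat) : Int) >>> (off - 8 * L))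
        = ((((pdfNatBig data >>> (8 * L)) % 2 ^ (8 * (H - L))) >>> (off - 8 * L) : Nat) : Int) from rfl,
      PySem.Int.band_natCast, Nat.and_two_pow_sub_one_eq_mod,
      pdf_chunk_val _ _ _ _ _ (by omega) (by omega)]
  rw [hv]
  have hvlt : pdfValN (pdfNatBig data) w off < 2 ^ w := Nat.mod_lt _ (by positivity)
  unfold pdfValI
  by_cases h1 : 1 < w
  · have hsgn : (if (w : Int) > 1 then (1 : Int) <<< ((w : Int) - 1).toNat else 0)
        = ((2 ^ (w - 1) : Nat) : Int) := by
      rw [if_pos (by exact_mod_cast h1), show (((w : Int)) - 1).toNat = w - 1 by omega,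
        pdf_one_shiftLeft]
    rw [hsgn]
    by_cases hb : (pdfValN (pdfNatBig data) w off).testBit (w - 1) = true
    · rw [if_pos (pdf_band_sign_ne.mpr hb),
        if_pos ⟨by rw [← pdf_testBit_valN (by omega : 0 < w)]; exact hb, h1⟩]
      rw [hmask]
      have h2 : (1:Nat) ≤ 2 ^ w := Nat.one_le_two_pow
      push_cast [h2]
      ring
    · rw [if_neg (fun hne => hb (pdf_band_sign_ne.mp hne)),
        if_neg (by
          rintro ⟨hbb, -⟩
          rw [← pdf_testBit_valN (by omega : 0 < w)] at hbb
          exact hb hbb)]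
  · have hsgn : (if (w : Int) > 1 then (1 : Int) <<< ((w : Int) - 1).toNat else 0) = 0 := by
      rw [if_neg (by exact_mod_cast h1)]
    rw [hsgn]
    simp only [PySem.Int.band_zero, ne_eq]
    rw [if_neg (by simp), if_neg (by rintro ⟨-, hgt⟩; omega)]

lemma pdf_alt_eq (data : List Int) {w c : Nat} (hw : 0 < w) (hc : 0 < c) :
    parse_delta_frame_alt data (c : Int) (w : Int) =
      (List.range ((8 * data.length) / (w * c))).map (pdfFrame (pdfNatBig data) w c) := by
  unfold parse_delta_frame_alt
  rw [if_neg (by push_neg; constructor <;> [push_cast; push_cast] <;> omega)]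
  have hnf : PySem.Int.floordiv (8 * (data.length : Int)) ((w : Int) * (c : Int))
      = (((8 * data.length) / (w * c) : Nat) : Int) := by
    rw [show (8 * (data.length : Int)) = ((8 * data.length : Nat) : Int) by push_cast; ring,
      show ((w : Int) * (c : Int)) = ((w * c : Nat) : Int) by push_cast; ring,
      PySem.Int.floordiv_natCast]
  simp only [hnf, Int.toNat_natCast, PySem.List.pyRange_zero_nat, List.map_map]
  apply List.map_congr_left
  intro F hF
  simp only [Function.comp_apply]
  unfold pdfFrame
  apply List.map_congr_left
  intro K hK
  simp only [Function.comp_apply]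
  have hF' : F + 1 ≤ (8 * data.length) / (w * c) := List.mem_range.mp hF
  have hK' : K + 1 ≤ c := List.mem_range.mp hK
  have hoff : (F * c + K) * w + w ≤ 8 * data.length := by
    have h1 : (F * c + K + 1) * w ≤ ((8 * data.length) / (w * c)) * (c * w) := by
      have h2 : F * c + K + 1 ≤ ((8 * data.length) / (w * c)) * c := by nlinarith
      nlinarith
    have h3 : ((8 * data.length) / (w * c)) * (w * c) ≤ 8 * data.length :=
      Nat.div_mul_le_self _ _
    nlinarith
  rw [show ((F : Int) * (c : Int) + (K : Int)) * (w : Int) = (((F * c + K) * w : Nat) : Int) by push_cast; ring]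
  exact pdf_alt_extract_eq data hw ((F * c + K) * w) hoff

lemma pdf_main (data : List Int) (channels : Int) (bit_width : Int) :
    parse_delta_frame data channels bit_width = parse_delta_frame_alt data channels bit_width := by
  by_cases hg : bit_width ≤ 0 ∨ channels ≤ 0
  · unfold parse_delta_frame parse_delta_frame_alt
    rw [if_pos (Or.inr hg), if_pos hg]
  · push_neg at hg
    obtain ⟨hbw, hch⟩ := hg
    have hw : 0 < bit_width.toNat := by omega
    have hc : 0 < channels.toNat := by omega
    have hbweq : bit_width = (bit_width.toNat : Int) := by omega
    have hcheq : channels = (channels.toNat : Int) := by omega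
    rw [hbweq, hcheq, pdf_alt_eq data hw hc]
    by_cases hd : data.length = 0
    · unfold parse_delta_frame
      rw [if_pos (Or.inl hd), hd]
      simp
    · unfold parse_delta_frame
      rw [if_neg (by push_neg; refine ⟨hd, by push_cast; omega, by push_cast; omega⟩)]
      simp only [pdf_bits_eq, List.length_map, List.length_range]
      rw [show (0 : Int) = ((0 * (bit_width.toNat * channels.toNat) : Nat) : Int) by simp]
      rw [pdf_outer_eq (pdf_natBig_lt data) hw hc (8 * data.length + 1) 0 [] (by
        have := Nat.div_le_self (8 * data.length) (bit_width.toNat * channels.toNat)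
        omega)]
      simp

-- ===== VERDICT (by name: the statement is the Claim_ definition above) =====
theorem parse_delta_frame_spec : Claim_equal_parse_delta_frame := by
  intro data channels bit_width _
  unfold Spec_parse_delta_frame
  exact pdf_main data channels bit_width
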